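-- pv_equiv track=rewrite | github.com/sercxanto/pimtools | ical_split.py | get_component_match
-- ===== SOURCE A (Python) =====
-- def get_component_match(line):
--     """Get ical component name and limiter ("LIMITER:component",
--     e.g. "BEGIN:VEVENT")
--
--     line: The line to match
--
--     Returns dictionary e.g. {"limiter": "BEGIN", "component":"VEVENT"}
--     Returns None if no match
--
--     Example:
--          get_component_limiter("END:VTODO")
--
--     returns:
--         {"limiter": "END", "component": "VTODO"}"""
--     possible_components = [
--             "VEVENT", "VTODO", "VJOURNAL", "VFREEBUSY", "VTIMEZONE"]
--
--     for component in possible_components: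
--         if line.startswith("BEGIN:" + component):
--             return {"limiter": "BEGIN", "component" : component}
--         if line.startswith("END:" + component):
--             return {"limiter": "END", "component" : component}
--     return None
-- ===== SOURCE B (Python) =====
-- def get_component_match(line):
--     """Get ical component name and limiter; None if no match."""
--     if line.startswith("BEGIN:"):
--         limiter, rest = "BEGIN", line[6:]
--     elif line.startswith("END:"):
--         limiter, rest = "END", line[4:]
--     else:
--         return None
--     for component in ("VEVENT", "VTODO", "VJOURNAL", "VFREEBUSY", "VTIMEZONE"):
--         if rest.startswith(component):
--             return {"limiter": limiter, "component": component}
--     return None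
-- ===== Notes on version B (the rewrite author's own statement) =====
-- stated objective: simpler
-- what changed: B tests the limiter prefix (BEGIN:/END:) once up front and then scans the component names against the remainder, instead of A's loop that builds and tests two concatenated prefixes per component.
import Mathlib
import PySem

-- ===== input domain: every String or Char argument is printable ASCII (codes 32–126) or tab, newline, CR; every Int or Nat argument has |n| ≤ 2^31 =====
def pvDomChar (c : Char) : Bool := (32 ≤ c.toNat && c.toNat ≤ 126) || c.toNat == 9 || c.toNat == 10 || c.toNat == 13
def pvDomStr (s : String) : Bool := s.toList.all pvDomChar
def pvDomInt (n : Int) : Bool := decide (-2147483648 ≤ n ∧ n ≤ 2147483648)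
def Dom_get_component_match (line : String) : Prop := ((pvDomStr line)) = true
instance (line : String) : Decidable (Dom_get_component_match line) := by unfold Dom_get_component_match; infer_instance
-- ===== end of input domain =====

-- B tests the limiter prefix (BEGIN:/END:) once up front and then scans the component
-- names against the remainder of the line, instead of A's loop that builds and tests
-- two concatenated prefixes per component (objective: simpler).

-- ===== PORT A =====
def pvComponentsA : List String := ["VEVENT", "VTODO", "VJOURNAL", "VFREEBUSY", "VTIMEZONE"]

def pvLoopA (line : String) : List String → Option (List (String × String))
  | [] => none
  | c :: rest =>
    if PySem.Str.startswith line ("BEGIN:" ++ c) then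
      some [("limiter", "BEGIN"), ("component", c)]
    else if PySem.Str.startswith line ("END:" ++ c) then
      some [("limiter", "END"), ("component", c)]
    else pvLoopA line rest

def get_component_match (line : String) : Option (List (String × String)) :=
  pvLoopA line pvComponentsA

-- ===== PORT B =====
def pvComponentsB : List String := ["VEVENT", "VTODO", "VJOURNAL", "VFREEBUSY", "VTIMEZONE"]

def pvFindComp (rest : String) : List String → Option String
  | [] => none
  | c :: cs => if PySem.Str.startswith rest c then some c else pvFindComp rest cs

def get_component_match_alt (line : String) : Option (List (String × String)) :=
  if PySem.Str.startswith line "BEGIN:" then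
    match pvFindComp (PySem.Str.slice line (some 6) none) pvComponentsB with
    | some c => some [("limiter", "BEGIN"), ("component", c)]
    | none => none
  else if PySem.Str.startswith line "END:" then
    match pvFindComp (PySem.Str.slice line (some 4) none) pvComponentsB with
    | some c => some [("limiter", "END"), ("component", c)]
    | none => none
  else none

-- ===== PRECONDITION & SPEC =====
def Spec_get_component_match (line : String) (out : Option (List (String × String))) : Prop := out = get_component_match_alt line
instance (line : String) (out : Option (List (String × String))) : Decidable (Spec_get_component_match line out) := by unfold Spec_get_component_match; infer_instance

-- ===== CLAIM (what is proved, stated in full; the proofs are below) =====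
def Claim_equal_get_component_match : Prop := ∀ (line : String), Dom_get_component_match line → Spec_get_component_match line (get_component_match line)

-- ===== LEMMAS AND PROOFS =====

lemma pv_prefix_append_iff (p q s : List Char) :
    p ++ q <+: s ↔ p <+: s ∧ q <+: s.drop p.length := by
  constructor
  · rintro ⟨t, rfl⟩
    refine ⟨⟨q ++ t, by simp⟩, ?_⟩
    rw [List.append_assoc, List.drop_left]
    exact ⟨t, rfl⟩
  · rintro ⟨⟨t, rfl⟩, hq⟩
    rw [List.drop_left] at hq
    obtain ⟨u, rfl⟩ := hq
    exact ⟨u, by simp⟩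

lemma pv_sw_false {s p : List Char} (h : ¬ p <+: s) :
    PySem.Chars.startswith s p = false := by
  rw [← Bool.not_eq_true, PySem.Chars.startswith_iff]; exact h

lemma pv_sw_append (s p q : List Char) :
    PySem.Chars.startswith s (p ++ q)
      = (PySem.Chars.startswith s p && PySem.Chars.startswith (s.drop p.length) q) := by
  by_cases hp : p <+: s
  · by_cases hq : q <+: s.drop p.length
    · rw [(PySem.Chars.startswith_iff _ _).mpr ((pv_prefix_append_iff p q s).mpr ⟨hp, hq⟩),
        (PySem.Chars.startswith_iff _ _).mpr hp, (PySem.Chars.startswith_iff _ _).mpr hq]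
      rfl
    · rw [pv_sw_false (fun h => hq ((pv_prefix_append_iff p q s).mp h).2),
        (PySem.Chars.startswith_iff _ _).mpr hp, pv_sw_false hq]
      rfl
  · rw [pv_sw_false (fun h => hp ((pv_prefix_append_iff p q s).mp h).1), pv_sw_false hp]
    rfl

lemma pv_sw_disjoint (s p q : List Char) (c d : Char) (hne : c ≠ d)
    (h : PySem.Chars.startswith s (c :: p) = true) :
    PySem.Chars.startswith s (d :: q) = false := by
  rw [PySem.Chars.startswith_iff] at h
  obtain ⟨t, rfl⟩ := h
  apply pv_sw_false
  rintro ⟨u, hu⟩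
  simp [List.cons_append] at hu
  exact hne hu.1.symm

-- the remainder after the limiter prefix, as a list of characters
lemma pv_slice_toList (line : String) (n : Int) (hn : 0 ≤ n) :
    (PySem.Str.slice line (some n) none).toList = line.toList.drop n.toNat := by
  rw [PySem.Str.toList_slice]
  simp [PySem.List.slice_from _ hn]

-- if the line starts with "BEGIN:", A's loop agrees with B's component scan
lemma pv_begin_case (line : String) (h : PySem.Str.startswith line "BEGIN:" = true)
    (comps : List String) :
    pvLoopA line comps =
      (match pvFindComp (PySem.Str.slice line (some 6) none) comps with
       | some c => some [("limiter", "BEGIN"), ("component", c)]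
       | none => none) := by
  have hB : PySem.Chars.startswith line.toList ("BEGIN:".toList) = true := by
    simpa using h
  have hrest : (PySem.Str.slice line (some 6) none).toList
      = line.toList.drop ("BEGIN:".toList.length) := by
    rw [pv_slice_toList line 6 (by norm_num)]
    congr 1
  induction comps with
  | nil => rfl
  | cons c cs ih =>
    have e1 : PySem.Str.startswith line ("BEGIN:" ++ c)
        = PySem.Str.startswith (PySem.Str.slice line (some 6) none) c := by
      simp only [PySem.Str.startswith_eq, String.toList_append]
      rw [pv_sw_append, hB, Bool.true_and, ← hrest]
    have e2 : PySem.Str.startswith line ("END:" ++ c) = false := by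
      simp only [PySem.Str.startswith_eq, String.toList_append]
      rw [(by decide : "END:".toList = 'E' :: "ND:".toList), List.cons_append]
      rw [(by decide : "BEGIN:".toList = 'B' :: "EGIN:".toList)] at hB
      exact pv_sw_disjoint _ _ _ 'B' 'E' (by decide) hB
    cases hc : PySem.Str.startswith (PySem.Str.slice line (some 6) none) c with
    | false =>
      simp only [pvLoopA, pvFindComp, e1, e2, hc, Bool.false_eq_true, if_false]
      exact ih
    | true =>
      simp only [pvLoopA, pvFindComp, e1, e2, hc, Bool.false_eq_true, if_false, if_true]

-- if the line starts with "END:" (hence not "BEGIN:"), same for the END branch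
lemma pv_end_case (line : String) (h : PySem.Str.startswith line "END:" = true)
    (comps : List String) :
    pvLoopA line comps =
      (match pvFindComp (PySem.Str.slice line (some 4) none) comps with
       | some c => some [("limiter", "END"), ("component", c)]
       | none => none) := by
  have hE : PySem.Chars.startswith line.toList ("END:".toList) = true := by
    simpa using h
  have hrest : (PySem.Str.slice line (some 4) none).toList
      = line.toList.drop ("END:".toList.length) := by
    rw [pv_slice_toList line 4 (by norm_num)]
    congr 1
  induction comps with
  | nil => rfl
  | cons c cs ih =>
    have e1 : PySem.Str.startswith line ("END:" ++ c)
        = PySem.Str.startswith (PySem.Str.slice line (some 4) none) c := by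
      simp only [PySem.Str.startswith_eq, String.toList_append]
      rw [pv_sw_append, hE, Bool.true_and, ← hrest]
    have e2 : PySem.Str.startswith line ("BEGIN:" ++ c) = false := by
      simp only [PySem.Str.startswith_eq, String.toList_append]
      rw [(by decide : "BEGIN:".toList = 'B' :: "EGIN:".toList), List.cons_append]
      rw [(by decide : "END:".toList = 'E' :: "ND:".toList)] at hE
      exact pv_sw_disjoint _ _ _ 'E' 'B' (by decide) hE
    cases hc : PySem.Str.startswith (PySem.Str.slice line (some 4) none) c with
    | false =>
      simp only [pvLoopA, pvFindComp, e1, e2, hc, Bool.false_eq_true, if_false]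
      exact ih
    | true =>
      simp only [pvLoopA, pvFindComp, e1, e2, hc, Bool.false_eq_true, if_false, if_true]

-- if the line starts with neither limiter, A's loop returns none
lemma pv_none_case (line : String)
    (hB : PySem.Str.startswith line "BEGIN:" = false)
    (hE : PySem.Str.startswith line "END:" = false)
    (comps : List String) : pvLoopA line comps = none := by
  induction comps with
  | nil => rfl
  | cons c cs ih =>
    have hB' : PySem.Chars.startswith line.toList ("BEGIN:".toList) = false := by simpa using hB
    have hE' : PySem.Chars.startswith line.toList ("END:".toList) = false := by simpa using hE
    have e1 : PySem.Str.startswith line ("BEGIN:" ++ c) = false := by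
      simp only [PySem.Str.startswith_eq, String.toList_append]
      rw [pv_sw_append, hB', Bool.false_and]
    have e2 : PySem.Str.startswith line ("END:" ++ c) = false := by
      simp only [PySem.Str.startswith_eq, String.toList_append]
      rw [pv_sw_append, hE', Bool.false_and]
    simp only [pvLoopA, e1, e2, Bool.false_eq_true, if_false]
    exact ih

-- ===== VERDICT (by name: the statement is the Claim_ definition above) =====
set_option maxHeartbeats 1600000 in
theorem get_component_match_spec : Claim_equal_get_component_match := by
  intro line _
  unfold Spec_get_component_match get_component_match get_component_match_alt
  by_cases hB : PySem.Str.startswith line "BEGIN:" = true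
  · simp only [hB, if_true]
    exact pv_begin_case line hB pvComponentsA
  · simp only [Bool.not_eq_true] at hB
    simp only [hB, Bool.false_eq_true, if_false]
    by_cases hE : PySem.Str.startswith line "END:" = true
    · simp only [hE, if_true]
      exact pv_end_case line hE pvComponentsA
    · simp only [Bool.not_eq_true] at hE
      simp only [hE, Bool.false_eq_true, if_false]
      exact pv_none_case line hB hE pvComponentsA
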